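-- pv_equiv track=rewrite | github.com/jz-learning/cs577 | assignments/02/array_matrix.py | transform
-- ===== SOURCE A (Python) =====
-- def transform(arr):
--     """O(n^2) Algo for transforming array into matrix with the sum"""
--     n = len(arr)
--     res = [n * [0] for _ in range(n)]
--
--     for i in range(n):
--         sum = arr[i]
--         for j in range(1 + i, n):
--             sum += arr[j]
--             res[i][j] = sum
--
--     return res
-- ===== SOURCE B (Python) =====
-- def transform(arr):
--     """Prefix-sum table + comprehension instead of per-row running-sum mutation."""
--     n = len(arr)
--     prefix = [0]
--     for x in arr:
--         prefix.append(prefix[-1] + x)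
--     return [[prefix[j + 1] - prefix[i] if j > i else 0 for j in range(n)]
--             for i in range(n)]
-- ===== Notes on version B (the rewrite author's own statement) =====
-- stated objective: idiomatic
-- what changed: Replaced the per-row running-sum accumulation into a mutated matrix by a precomputed prefix-sum array plus a nested comprehension computing each entry as a prefix difference.
import Mathlib
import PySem

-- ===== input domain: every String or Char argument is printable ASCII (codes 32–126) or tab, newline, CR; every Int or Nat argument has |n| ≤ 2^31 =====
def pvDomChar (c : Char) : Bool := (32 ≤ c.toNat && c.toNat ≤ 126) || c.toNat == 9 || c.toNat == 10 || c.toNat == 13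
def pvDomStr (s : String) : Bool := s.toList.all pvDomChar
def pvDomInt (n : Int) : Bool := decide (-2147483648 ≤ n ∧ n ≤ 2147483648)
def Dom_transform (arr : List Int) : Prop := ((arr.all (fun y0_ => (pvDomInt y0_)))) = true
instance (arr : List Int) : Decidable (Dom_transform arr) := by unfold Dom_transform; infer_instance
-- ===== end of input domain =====

-- B replaces A's per-row running-sum mutation of a zero matrix by a prefix-sum table
-- plus a nested comprehension (each entry is a prefix difference); same O(n^2) cost.

-- ===== PORT A =====
-- literal transliteration of Source A (n = len(arr) inlined as arr.length):
-- outer loop over i threads the mutated matrix res; inner loop threads (sum, res)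
def transform (arr : List Int) : List (List Int) :=
  (List.range arr.length).foldl (fun res i =>
    ((List.range' (1 + i) (arr.length - (1 + i))).foldl
      (fun (p : Int × List (List Int)) j =>
        let s := p.1 + arr.getD j 0
        (s, p.2.set i ((p.2.getD i []).set j s)))
      (arr.getD i 0, res)).2)
    ((List.range arr.length).map (fun _ => List.replicate arr.length (0 : Int)))

-- ===== PORT B =====
-- literal transliteration of Source B: build the prefix list by appending (P[-1] = getLast!),
-- then a nested comprehension of prefix differences
def transform_alt (arr : List Int) : List (List Int) :=
  let P := arr.foldl (fun P x => P ++ [P.getLast! + x]) [(0 : Int)]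
  (List.range arr.length).map (fun i =>
    (List.range arr.length).map (fun j =>
      if i < j then P.getD (j + 1) 0 - P.getD i 0 else 0))

-- ===== PRECONDITION & SPEC =====
def Spec_transform (arr : List Int) (out : List (List Int)) : Prop := out = transform_alt arr
instance (arr : List Int) (out : List (List Int)) : Decidable (Spec_transform arr out) := by unfold Spec_transform; infer_instance

-- ===== CLAIM (what is proved, stated in full; the proofs are below) =====
def Claim_equal_transform : Prop := ∀ (arr : List Int), Dom_transform arr → Spec_transform arr (transform arr)

-- ===== LEMMAS AND PROOFS =====

/-- prefix sum of the first `k` elements -/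
def pref (arr : List Int) (k : Nat) : Int := (arr.take k).sum

/-- the common closed form of both programs' rows -/
def rowF (arr : List Int) (i : Nat) : List Int :=
  (List.range arr.length).map (fun j => if i < j then pref arr (j + 1) - pref arr i else 0)

lemma pref_succ (arr : List Int) (k : Nat) (hk : k < arr.length) :
    pref arr (k + 1) = pref arr k + arr.getD k 0 := by
  unfold pref
  rw [List.sum_take_succ _ _ hk, List.getD_eq_getElem _ _ hk]

lemma set_map_range {α : Type} (f : Nat → α) (n t : Nat) (v : α) (_ht : t < n) :
    ((List.range n).map f).set t v
      = (List.range n).map (fun j => if j = t then v else f j) := by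
  apply List.ext_getElem
  · simp
  · intro k h1 h2
    simp only [List.getElem_set, List.getElem_map, List.getElem_range]
    by_cases h : t = k
    · subst h; simp
    · rw [if_neg h, if_neg (fun e => h e.symm)]

/-- B's prefix list is the table of `pref` values. -/
lemma prefix_eq (arr : List Int) :
    arr.foldl (fun P x => P ++ [P.getLast! + x]) [(0 : Int)]
      = (List.range (arr.length + 1)).map (pref arr) := by
  induction arr using List.reverseRecOn with
  | nil => simp [pref]
  | append_singleton as x ih =>
    rw [List.foldl_append, ih]
    simp only [List.foldl_cons, List.foldl_nil]
    have hlast : (((List.range (as.length + 1)).map (pref as)).getLast!)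
        = pref as as.length := by
      rw [List.getLast!_eq_getLast?_getD, List.getLast?_eq_getElem?]
      simp
    rw [hlast]
    apply List.ext_getElem
    · simp
    · intro k h1 h2
      simp only [List.length_append, List.length_map, List.length_range,
        List.length_singleton] at h1 h2 ⊢
      by_cases hk : k < as.length + 1
      · rw [List.getElem_append_left (by simpa using hk)]
        simp only [List.getElem_map, List.getElem_range]
        have : pref (as ++ [x]) k = pref as k := by
          simp [pref, List.take_append_of_le_length (by omega : k ≤ as.length)]
        simp [this]
      · have hk' : k = as.length + 1 := by
          omega
        subst hk'
        rw [List.getElem_append_right (by simp)]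
        simp only [List.length_map, List.length_range]
        have : pref (as ++ [x]) (as.length + 1) = pref as as.length + x := by
          simp [pref, List.take_of_length_le (by simp : (as ++ [x]).length ≤ as.length + 1)]
        simp [this]

lemma getD_map_range_pref (arr : List Int) (k : Nat) (hk : k ≤ arr.length) :
    ((List.range (arr.length + 1)).map (pref arr)).getD k 0 = pref arr k := by
  rw [List.getD_eq_getElem?_getD, List.getElem?_map, List.getElem?_range (by omega)]
  rfl

/-- B's port computes the closed form. -/
lemma alt_eq_target (arr : List Int) :
    transform_alt arr = (List.range arr.length).map (rowF arr) := by
  unfold transform_alt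
  rw [prefix_eq]
  apply List.map_congr_left
  intro i hi
  unfold rowF
  apply List.map_congr_left
  intro j hj
  simp only [List.mem_range] at hi hj
  split_ifs with h
  · rw [getD_map_range_pref arr (j + 1) (by omega), getD_map_range_pref arr i (by omega)]
  · rfl

/-- inner fold of A factors: only row `i` of `res` is touched -/
lemma inner_factor (arr : List Int) (i : Nat) (js : List Nat) (res : List (List Int))
    (s0 : Int) (h : i < res.length) :
    (js.foldl
        (fun (p : Int × List (List Int)) j =>
          let s := p.1 + arr.getD j 0
          (s, p.2.set i ((p.2.getD i []).set j s)))
        (s0, res))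
      = ((js.foldl (fun (q : Int × List Int) j =>
            let s := q.1 + arr.getD j 0
            (s, q.2.set j s)) (s0, res.getD i [])).1,
         res.set i ((js.foldl (fun (q : Int × List Int) j =>
            let s := q.1 + arr.getD j 0
            (s, q.2.set j s)) (s0, res.getD i [])).2)) := by
  induction js generalizing res s0 with
  | nil =>
    simp only [List.foldl_nil]
    rw [List.getD_eq_getElem _ _ h, List.set_getElem_self]
  | cons j js ih =>
    simp only [List.foldl_cons]
    rw [ih _ _ (by simpa using h)]
    have hget : (res.set i ((res.getD i []).set j (s0 + arr.getD j 0))).getD i []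
        = (res.getD i []).set j (s0 + arr.getD j 0) := by
      rw [List.getD_eq_getElem _ _ (by simpa using h),
        List.getElem_set_self (by simpa using h)]
    rw [hget, List.set_set]

/-- the running-sum row fold produces the closed-form row -/
lemma row_fold (arr : List Int) (i : Nat) (_hi : i < arr.length) (c : Nat)
    (hc : i + 1 + c ≤ arr.length) :
    (List.range' (i + 1) c).foldl (fun (q : Int × List Int) j =>
        let s := q.1 + arr.getD j 0
        (s, q.2.set j s))
      (pref arr (i + 1) - pref arr i,
       (List.range arr.length).map (fun _ => (0 : Int)))
      = (pref arr (i + 1 + c) - pref arr i,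
         (List.range arr.length).map
           (fun j => if i < j ∧ j < i + 1 + c then pref arr (j + 1) - pref arr i else 0)) := by
  induction c with
  | zero =>
    simp only [List.range'_zero, List.foldl_nil, Nat.add_zero]
    congr 1
    apply List.map_congr_left
    intro j hj
    rw [if_neg (by omega)]
  | succ c ihc =>
    have hc' : i + 1 + c ≤ arr.length := by omega
    have hrange : List.range' (i + 1) (c + 1) = List.range' (i + 1) c ++ [i + 1 + c] := by
      simp [List.range'_concat]
    rw [hrange, List.foldl_append, ihc hc']
    simp only [List.foldl_cons, List.foldl_nil]
    have hsum : pref arr (i + 1 + c) - pref arr i + arr.getD (i + 1 + c) 0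
        = pref arr (i + 1 + c + 1) - pref arr i := by
      rw [pref_succ arr (i + 1 + c) (by omega)]; ring
    rw [hsum]
    have hidx : i + 1 + (c + 1) = i + 1 + c + 1 := rfl
    rw [hidx]
    congr 1
    rw [set_map_range _ _ _ _ (by omega)]
    apply List.map_congr_left
    intro j hj
    simp only [List.mem_range] at hj
    by_cases h : j = i + 1 + c
    · subst h
      rw [if_pos rfl, if_pos (by omega)]
    · rw [if_neg h]
      by_cases h2 : i < j ∧ j < i + 1 + c
      · rw [if_pos h2, if_pos (by omega)]
      · rw [if_neg h2, if_neg (by omega)]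

/-- A's outer fold, processed up to `m`, fills the first `m` rows with the closed form. -/
lemma outer_fold (arr : List Int) (m : Nat) (hm : m ≤ arr.length) :
    (List.range m).foldl (fun res i =>
      ((List.range' (1 + i) (arr.length - (1 + i))).foldl
        (fun (p : Int × List (List Int)) j =>
          let s := p.1 + arr.getD j 0
          (s, p.2.set i ((p.2.getD i []).set j s)))
        (arr.getD i 0, res)).2)
      ((List.range arr.length).map (fun _ => List.replicate arr.length (0 : Int)))
      = (List.range arr.length).map
          (fun k => if k < m then rowF arr k else List.replicate arr.length (0 : Int)) := by
  induction m with
  | zero => simp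
  | succ m ihm =>
    rw [List.range_succ, List.foldl_append, ihm (by omega)]
    simp only [List.foldl_cons, List.foldl_nil]
    have hm' : m < arr.length := by omega
    rw [inner_factor arr m (List.range' (1 + m) (arr.length - (1 + m)))
      ((List.range arr.length).map
        (fun k => if k < m then rowF arr k else List.replicate arr.length (0 : Int)))
      (arr.getD m 0) (by simpa using hm')]
    have hrow : ((List.range arr.length).map
        (fun k => if k < m then rowF arr k else List.replicate arr.length (0 : Int))).getD m []
        = List.replicate arr.length (0 : Int) := by
      rw [List.getD_eq_getElem _ _ (by simpa using hm')]
      simp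
    rw [hrow]
    have hrepl : (List.replicate arr.length (0 : Int))
        = (List.range arr.length).map (fun _ => (0 : Int)) := by
      apply List.ext_getElem <;> simp
    have hstart : arr.getD m 0 = pref arr (m + 1) - pref arr m := by
      rw [pref_succ arr m hm']; ring
    rw [hrepl, hstart, Nat.add_comm 1 m,
      row_fold arr m hm' (arr.length - (m + 1)) (by omega)]
    have hfill : m + 1 + (arr.length - (m + 1)) = arr.length := by omega
    simp only [hfill]
    rw [set_map_range _ _ _ _ hm']
    apply List.map_congr_left
    intro k hk
    simp only [List.mem_range] at hk
    by_cases h : k = m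
    · rw [if_pos h, if_pos (by omega), h]
      unfold rowF
      apply List.map_congr_left
      intro j hj
      simp only [List.mem_range] at hj
      by_cases h2 : m < j
      · rw [if_pos (by omega), if_pos h2]
      · rw [if_neg (by omega), if_neg h2]
    · rw [if_neg h]
      by_cases h2 : k < m
      · rw [if_pos h2, if_pos (by omega)]
      · rw [if_neg h2, if_neg (by omega)]

/-- A's port computes the closed form. -/
lemma a_eq_target (arr : List Int) :
    transform arr = (List.range arr.length).map (rowF arr) := by
  unfold transform
  rw [outer_fold arr arr.length (le_refl _)]
  apply List.map_congr_left
  intro k hk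
  simp only [List.mem_range] at hk
  rw [if_pos hk]

-- ===== VERDICT (by name: the statement is the Claim_ definition above) =====
theorem transform_spec : Claim_equal_transform := by
  intro arr _
  unfold Spec_transform
  rw [a_eq_target, alt_eq_target]
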